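-- pv_equiv track=rewrite | github.com/hanle23/AdventOfCode | 2024/09/a-p2.py | findIDLocation
-- ===== SOURCE A (Python) =====
-- def findIDLocation(diskMap, id, lastUsed):
--     start = end = lastUsed
--     while end != 0 and start != 0:
--         if diskMap[end] != id:
--             end -= 1
--             start -= 1
--         elif diskMap[end] == id and diskMap[start] == id:
--             start -= 1
--         elif diskMap[end] == id and diskMap[start] != id:
--             start += 1
--             break
--     return start, end
-- ===== SOURCE B (Python) =====
-- def findIDLocation(diskMap, id, lastUsed):
--     # Forward pass: collect all matching indices in [1, lastUsed]; the block end
--     # is the last one.  Then collect all non-matching indices below it; the block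
--     # start is just past the last of those (0 if there is none).
--     hits = [i for i in range(1, lastUsed + 1) if diskMap[i] == id]
--     if not hits:
--         return 0, 0
--     end = hits[-1]
--     misses = [j for j in range(1, end) if diskMap[j] != id]
--     start = misses[-1] + 1 if misses else 0
--     return start, end
-- ===== Notes on version B (the rewrite author's own statement) =====
-- stated objective: alternative
-- what changed: replaces A's backward fused state-machine scan over a (start,end) pointer pair with a forward pass that materialises the matching indices in [1,lastUsed] (end = last hit) and the non-matching indices below end (start = last miss + 1, else 0).
-- outside the precondition, e.g. on findIDLocation([1, 5], 5, -1): A returns (-1, -1), B returns (0, 0); on findIDLocation([1], 0, 5): A raises IndexError, B raises IndexError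
import Mathlib
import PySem

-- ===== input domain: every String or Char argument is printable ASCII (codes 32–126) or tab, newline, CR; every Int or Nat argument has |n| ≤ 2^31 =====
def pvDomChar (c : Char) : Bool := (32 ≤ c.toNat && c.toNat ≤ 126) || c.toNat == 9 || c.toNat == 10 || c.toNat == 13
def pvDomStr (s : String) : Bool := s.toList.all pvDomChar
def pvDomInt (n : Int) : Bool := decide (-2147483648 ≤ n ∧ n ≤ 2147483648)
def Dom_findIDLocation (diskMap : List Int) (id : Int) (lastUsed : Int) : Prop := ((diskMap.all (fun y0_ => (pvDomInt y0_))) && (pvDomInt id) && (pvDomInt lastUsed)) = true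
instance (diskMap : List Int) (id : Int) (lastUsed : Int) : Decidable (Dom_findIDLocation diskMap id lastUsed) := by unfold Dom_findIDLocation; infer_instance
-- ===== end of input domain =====

-- B replaces A's backward fused (start,end) state-machine scan with a forward pass that
-- materialises the matching index list (end = last hit) and the miss list below it (alternative decomposition, same cost).

-- ===== PORT A =====
-- fused while-loop over (start, end); fuel bounds the iteration count (start strictly decreases or the loop breaks)
def loopA (diskMap : List Int) (id : Int) : Nat → Int → Int → Int × Int
  | 0, start, e => (start, e)
  | fuel+1, start, e =>
    if e ≠ 0 ∧ start ≠ 0 then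
      if PySem.List.pyGetD diskMap e 0 ≠ id then
        loopA diskMap id fuel (start - 1) (e - 1)
      else if PySem.List.pyGetD diskMap e 0 = id ∧ PySem.List.pyGetD diskMap start 0 = id then
        loopA diskMap id fuel (start - 1) e
      else if PySem.List.pyGetD diskMap e 0 = id ∧ PySem.List.pyGetD diskMap start 0 ≠ id then
        (start + 1, e)
      else (start, e)
    else (start, e)

def findIDLocation (diskMap : List Int) (id : Int) (lastUsed : Int) : Int × Int :=
  loopA diskMap id (lastUsed.toNat + 1) lastUsed lastUsed

-- ===== PORT B =====
-- hits = [i for i in range(1, lastUsed+1) if diskMap[i] == id]; end = hits[-1] (or return (0,0));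
-- misses = [j for j in range(1, end) if diskMap[j] != id]; start = misses[-1] + 1 (or 0)
def findIDLocation_alt (diskMap : List Int) (id : Int) (lastUsed : Int) : Int × Int :=
  let hits := (PySem.List.pyRange 1 (lastUsed + 1) 1).filter (fun i => PySem.List.pyGetD diskMap i 0 == id)
  match hits.getLast? with
  | none => (0, 0)
  | some e =>
    let misses := (PySem.List.pyRange 1 e 1).filter (fun j => PySem.List.pyGetD diskMap j 0 != id)
    match misses.getLast? with
    | none => (0, e)
    | some j => (j + 1, e)

-- ===== PRECONDITION & SPEC =====
-- Pre_ excludes lastUsed outside [0, len(diskMap)) other than lastUsed = 0: there A relies on Python's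
-- negative-index wraparound (or raises IndexError), while B's forward range never reaches those indices.
def Pre_findIDLocation (diskMap : List Int) (id : Int) (lastUsed : Int) : Prop :=
  lastUsed = 0 ∨ (0 ≤ lastUsed ∧ lastUsed < diskMap.length)
instance (diskMap : List Int) (id : Int) (lastUsed : Int) : Decidable (Pre_findIDLocation diskMap id lastUsed) := by unfold Pre_findIDLocation; infer_instance
def pvWitness_findIDLocation : List Int × Int × Int := ([1, 5, 5, 2], 5, 3)

def Spec_findIDLocation (diskMap : List Int) (id : Int) (lastUsed : Int) (out : Int × Int) : Prop := out = findIDLocation_alt diskMap id lastUsed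
instance (diskMap : List Int) (id : Int) (lastUsed : Int) (out : Int × Int) : Decidable (Spec_findIDLocation diskMap id lastUsed out) := by unfold Spec_findIDLocation; infer_instance

-- ===== CLAIM (what is proved, stated in full; the proofs are below) =====
def Claim_equal_findIDLocation : Prop := ∀ (diskMap : List Int) (id : Int) (lastUsed : Int), Dom_findIDLocation diskMap id lastUsed → Pre_findIDLocation diskMap id lastUsed → Spec_findIDLocation diskMap id lastUsed (findIDLocation diskMap id lastUsed)

-- ===== LEMMAS AND PROOFS =====

-- proof-only helpers: the two phases hidden in A's fused loop
def phase1 (diskMap : List Int) (id : Int) : Nat → Int → Int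
  | 0, e => e
  | fuel+1, e => if e ≠ 0 ∧ PySem.List.pyGetD diskMap e 0 ≠ id then phase1 diskMap id fuel (e - 1) else e

def phase2 (diskMap : List Int) (id : Int) : Nat → Int → Int
  | 0, s => s
  | fuel+1, s => if s ≠ 0 ∧ PySem.List.pyGetD diskMap s 0 = id then phase2 diskMap id fuel (s - 1) else s

theorem phase2_fuel (diskMap : List Int) (id : Int) :
    ∀ (f g : Nat) (s : Int), 0 ≤ s → s.toNat < f → s.toNat < g →
    phase2 diskMap id f s = phase2 diskMap id g s := by
  intro f
  induction f with
  | zero => intro g s _ hf; omega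
  | succ f ih =>
    intro g s hs hf hg
    cases g with
    | zero => omega
    | succ g =>
      simp only [phase2]
      split
      · next h =>
        exact ih g (s - 1) (by omega) (by omega) (by omega)
      · rfl

theorem phase1_bounds (diskMap : List Int) (id : Int) :
    ∀ (f : Nat) (e : Int), 0 ≤ e → 0 ≤ phase1 diskMap id f e ∧ phase1 diskMap id f e ≤ e := by
  intro f
  induction f with
  | zero => intro e he; simp [phase1]; omega
  | succ f ih =>
    intro e he
    simp only [phase1]
    split
    · next h =>
      have := ih (e - 1) (by omega)
      omega
    · omega

-- A's loop after the id block's end has been found behaves as phase 2 plus the conditional +1.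
theorem loopA_phase2 (diskMap : List Int) (id : Int) (e : Int)
    (he : e ≠ 0) (hid : PySem.List.pyGetD diskMap e 0 = id) :
    ∀ (f : Nat) (s : Int), 0 ≤ s → s.toNat < f →
    loopA diskMap id f s e =
      ((if phase2 diskMap id f s = 0 then 0 else phase2 diskMap id f s + 1), e) := by
  intro f
  induction f with
  | zero => intro s _ hf; omega
  | succ f ih =>
    intro s hs hf
    by_cases h0 : s = 0
    · subst h0
      simp [loopA, phase2, he]
    · by_cases hsid : PySem.List.pyGetD diskMap s 0 = id
      · have h1 : loopA diskMap id (f+1) s e = loopA diskMap id f (s - 1) e := by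
          simp [loopA, he, h0, hid, hsid]
        have h2 : phase2 diskMap id (f+1) s = phase2 diskMap id f (s - 1) := by
          simp [phase2, h0, hsid]
        rw [h1, h2]
        exact ih (s - 1) (by omega) (by omega)
      · have h1 : loopA diskMap id (f+1) s e = (s + 1, e) := by
          simp [loopA, he, h0, hid, hsid]
        have h2 : phase2 diskMap id (f+1) s = s := by
          simp [phase2, hsid]
        rw [h1, h2]
        simp [h0]

-- Main correspondence of A's fused loop with the two phases, starting from start = end.
theorem loopA_main (diskMap : List Int) (id : Int) :
    ∀ (f : Nat) (e : Int), 0 ≤ e → e.toNat < f →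
    loopA diskMap id f e e =
      (let e' := phase1 diskMap id f e
       if e' = 0 then (0, 0)
       else ((if phase2 diskMap id f e' = 0 then 0 else phase2 diskMap id f e' + 1), e')) := by
  intro f
  induction f with
  | zero => intro e _ hf; omega
  | succ f ih =>
    intro e he hf
    by_cases h0 : e = 0
    · subst h0; simp [loopA, phase1]
    · by_cases hid : PySem.List.pyGetD diskMap e 0 = id
      · have hp1 : phase1 diskMap id (f+1) e = e := by simp [phase1, hid]
        simp only [hp1, h0]
        have h1 : loopA diskMap id (f+1) e e = loopA diskMap id f (e - 1) e := by
          simp [loopA, h0, hid]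
        have h2 : phase2 diskMap id (f+1) e = phase2 diskMap id f (e - 1) := by
          simp [phase2, h0, hid]
        rw [h1]
        rw [loopA_phase2 diskMap id e h0 hid f (e - 1) (by omega) (by omega)]
        simp only [h2]
        simp
      · have h1 : loopA diskMap id (f+1) e e = loopA diskMap id f (e - 1) (e - 1) := by
          simp [loopA, h0, hid]
        have hp1 : phase1 diskMap id (f+1) e = phase1 diskMap id f (e - 1) := by
          simp [phase1, h0, hid]
        rw [h1, ih (e - 1) (by omega) (by omega)]
        simp only [hp1]
        by_cases hz : phase1 diskMap id f (e - 1) = 0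
        · simp [hz]
        · have hb := phase1_bounds diskMap id f (e - 1) (by omega)
          have hfu : phase2 diskMap id f (phase1 diskMap id f (e - 1))
                   = phase2 diskMap id (f+1) (phase1 diskMap id f (e - 1)) :=
            phase2_fuel diskMap id f (f+1) _ (by omega) (by omega) (by omega)
          simp [hz, hfu]

-- phase 1 computes the last element of B's hit list (0 if there is none)
theorem phase1_char (diskMap : List Int) (id : Int) :
    ∀ (f : Nat) (e : Int), 0 ≤ e → e.toNat < f →
    phase1 diskMap id f e =
      (((PySem.List.pyRange 1 (e + 1) 1).filter
          (fun i => PySem.List.pyGetD diskMap i 0 == id)).getLast?).getD 0 := by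
  intro f
  induction f with
  | zero => intro e _ hf; omega
  | succ f ih =>
    intro e he hf
    by_cases h0 : e = 0
    · subst h0
      rw [PySem.List.pyRange_one_eq_nil (by norm_num)]
      simp [phase1]
    · rw [PySem.List.pyRange_one_succ_right (by omega)]
      rw [List.filter_append]
      by_cases hid : PySem.List.pyGetD diskMap e 0 = id
      · have : phase1 diskMap id (f+1) e = e := by simp [phase1, hid]
        rw [this]
        simp [hid]
      · have h1 : phase1 diskMap id (f+1) e = phase1 diskMap id f (e - 1) := by
          simp [phase1, h0, hid]
        have h2 : (e - 1) + 1 = e := by omega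
        rw [h1, ih (e - 1) (by omega) (by omega), h2]
        simp [hid]

-- phase 2 computes the last element of B's miss list below its start (0 if there is none)
theorem phase2_char (diskMap : List Int) (id : Int) :
    ∀ (f : Nat) (s : Int), 0 ≤ s → s.toNat < f →
    phase2 diskMap id f s =
      (((PySem.List.pyRange 1 (s + 1) 1).filter
          (fun j => PySem.List.pyGetD diskMap j 0 != id)).getLast?).getD 0 := by
  intro f
  induction f with
  | zero => intro s _ hf; omega
  | succ f ih =>
    intro s hs hf
    by_cases h0 : s = 0
    · subst h0
      rw [PySem.List.pyRange_one_eq_nil (by norm_num)]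
      simp [phase2]
    · rw [PySem.List.pyRange_one_succ_right (by omega)]
      rw [List.filter_append]
      by_cases hsid : PySem.List.pyGetD diskMap s 0 = id
      · have h1 : phase2 diskMap id (f+1) s = phase2 diskMap id f (s - 1) := by
          simp [phase2, h0, hsid]
        have h2 : (s - 1) + 1 = s := by omega
        rw [h1, ih (s - 1) (by omega) (by omega), h2]
        simp [hsid]
      · have : phase2 diskMap id (f+1) s = s := by simp [phase2, hsid]
        rw [this]
        simp [hsid]

-- ===== VERDICT (by name: the statement is the Claim_ definition above) =====
theorem findIDLocation_spec : Claim_equal_findIDLocation := by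
  intro diskMap id lastUsed _ hpre
  have hge : 0 ≤ lastUsed := by
    rcases hpre with h0 | ⟨hge, _⟩ <;> omega
  unfold Spec_findIDLocation findIDLocation findIDLocation_alt
  rw [loopA_main diskMap id (lastUsed.toNat + 1) lastUsed hge (by omega)]
  rw [phase1_char diskMap id (lastUsed.toNat + 1) lastUsed hge (by omega)]
  simp only []
  cases hh : ((PySem.List.pyRange 1 (lastUsed + 1) 1).filter
      (fun i => PySem.List.pyGetD diskMap i 0 == id)).getLast? with
  | none => simp
  | some e =>
    have hmem : e ∈ (PySem.List.pyRange 1 (lastUsed + 1) 1).filter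
        (fun i => PySem.List.pyGetD diskMap i 0 == id) := List.mem_of_getLast? hh
    rw [List.mem_filter] at hmem
    obtain ⟨hrng, hpe⟩ := hmem
    rw [PySem.List.mem_pyRange_one] at hrng
    have hid : PySem.List.pyGetD diskMap e 0 = id := by simpa using hpe
    have he0 : e ≠ 0 := by omega
    simp only [Option.getD_some, if_neg he0]
    rw [phase2_char diskMap id (lastUsed.toNat + 1) e (by omega) (by omega)]
    have hsplit : PySem.List.pyRange 1 (e + 1) 1 = PySem.List.pyRange 1 e 1 ++ [e] := by
      rw [PySem.List.pyRange_one_succ_right (by omega)]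
    rw [hsplit, List.filter_append]
    have hfe : (([e] : List Int).filter (fun j => PySem.List.pyGetD diskMap j 0 != id)) = [] := by
      simp [hid]
    rw [hfe, List.append_nil]
    cases hm : ((PySem.List.pyRange 1 e 1).filter
        (fun j => PySem.List.pyGetD diskMap j 0 != id)).getLast? with
    | none => simp
    | some j =>
      have hjmem : j ∈ (PySem.List.pyRange 1 e 1).filter
          (fun j => PySem.List.pyGetD diskMap j 0 != id) := List.mem_of_getLast? hm
      rw [List.mem_filter, PySem.List.mem_pyRange_one] at hjmem
      have hj0 : j ≠ 0 := by omega
      simp [hj0]
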